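-- pv_equiv track=rewrite | github.com/ShreyaPrabhu/go_game_agent | my_player3.py | get_best_of_valid_moves
-- ===== SOURCE A (Python) =====
-- from copy import deepcopy
--
-- BOARD_SIZE = 5
--
-- def get_unique_list(list):
--     res = []
--     for i in list:
--         if i not in res:
--             res.append(i)
--     return res
--
-- def position_exists_on_board(row, col):
--     if(row < 0 or col < 0 or row >= BOARD_SIZE or col >= BOARD_SIZE):
--         return False
--     else:
--         return True
--
-- def get_adjacent_neighbours(row, col):
--     adjacent_neighbours = []
--     if(position_exists_on_board(row+1, col)):
--         adjacent_neighbours.append((row+1,col))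
--     if(position_exists_on_board(row-1, col)):
--         adjacent_neighbours.append((row-1,col))
--     if(position_exists_on_board(row, col+1)):
--         adjacent_neighbours.append((row,col+1))
--     if(position_exists_on_board(row, col-1)):
--         adjacent_neighbours.append((row,col-1))
--     return adjacent_neighbours
--
-- def find_contiguous_blocks(i, j, board, player):
--     stack = [(i, j)]
--     contiguous_blocks = []
--     while stack:
--         position = stack.pop()
--         contiguous_blocks.append(position)
--         adjacent_neighbours = get_adjacent_neighbours(position[0], position[1])
--         adjacent_blocks = []
--         for adj_neigh in adjacent_neighbours:
--             if board[adj_neigh[0]][adj_neigh[1]] == player: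
--                 adjacent_blocks.append(adj_neigh)
--         for blocks in adjacent_blocks:
--             if blocks not in stack and blocks not in contiguous_blocks:
--                 stack.append(blocks)
--     return contiguous_blocks
--
-- def does_liberty_exists(i, j, board, player):
--     liberties = get_liberty_positions(i, j, board, player)
--     if liberties is not None and len(liberties) > 0:
--         return True
--     else:
--         return False
--
-- def get_liberty_positions(i, j,board,player):
--     liberties = []
--     contiguous_blocks = find_contiguous_blocks(i, j,board,player)
--     for blocks in contiguous_blocks:
--         neighbours = get_adjacent_neighbours(blocks[0], blocks[1])
--         for neighbour in neighbours:
--             if board[neighbour[0]][neighbour[1]] == 0: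
--                 liberties.append(neighbour)
--     return get_unique_list(liberties)
--
-- def find_dead_stones(player, board):
--     dead_pieces = []
--     for i in range(0, BOARD_SIZE):
--         for j in range(0, BOARD_SIZE):
--             if board[i][j] == player:
--                 if not does_liberty_exists(i, j, board, player):
--                     dead_pieces.append((i, j))
--     return dead_pieces
--
-- def clear_dead_stones(board, dead_pieces):
--     for piece in dead_pieces:
--         board[piece[0]][piece[1]] = 0
--     return board
--
-- def place_stone(i, j, board, player):
--     board[i][j] = player
--     return board
--
-- def ko_rule_check(previous_board, current_board, updated_board):
--     if updated_board != current_board and updated_board != previous_board: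
--         return True
--     else:
--         return False
--
-- def get_best_of_valid_moves(player, previous_board, current_board, best_moves):
--     best_valid_moves = []
--     for move in list(best_moves):
--         copied_board = deepcopy(current_board)
--         copied_board = place_stone(move[0], move[1], copied_board, player)
--         dead_pieces = find_dead_stones(3 - player, copied_board)
--         copied_board = clear_dead_stones(copied_board, dead_pieces)
--         if does_liberty_exists(move[0], move[1], copied_board, player):
--             if ko_rule_check(previous_board, current_board, copied_board):
--                 best_valid_moves.append((move[0], move[1], dead_pieces))
--     return best_valid_moves
-- ===== SOURCE B (Python) =====
-- from copy import deepcopy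
--
-- BOARD_SIZE = 5
--
-- def _neighbours(r, c):
--     out = []
--     for dr, dc in ((1, 0), (-1, 0), (0, 1), (0, -1)):
--         rr, cc = r + dr, c + dc
--         if 0 <= rr < BOARD_SIZE and 0 <= cc < BOARD_SIZE:
--             out.append((rr, cc))
--     return out
--
-- def _alive_stones(player, board):
--     # stones of `player` whose group has a liberty, by a whole-board backward
--     # fixpoint: seed with stones that touch an empty cell, then repeatedly add
--     # stones adjacent to already-alive stones until nothing changes.
--     alive = set()
--     for i in range(BOARD_SIZE):
--         for j in range(BOARD_SIZE):
--             if board[i][j] == player and any(board[r][c] == 0 for r, c in _neighbours(i, j)):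
--                 alive.add((i, j))
--     for _ in range(BOARD_SIZE * BOARD_SIZE):
--         new = set(alive)
--         for i in range(BOARD_SIZE):
--             for j in range(BOARD_SIZE):
--                 if board[i][j] == player and (i, j) not in new and any(p in alive for p in _neighbours(i, j)):
--                     new.add((i, j))
--         if new == alive:
--             break
--         alive = new
--     return alive
--
-- def get_best_of_valid_moves(player, previous_board, current_board, best_moves):
--     best_valid_moves = []
--     for move in best_moves:
--         board = deepcopy(current_board)
--         board[move[0]][move[1]] = player
--         opp_alive = _alive_stones(3 - player, board)
--         dead_pieces = [(i, j) for i in range(BOARD_SIZE) for j in range(BOARD_SIZE)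
--                        if board[i][j] == 3 - player and (i, j) not in opp_alive]
--         for i, j in dead_pieces:
--             board[i][j] = 0
--         if (move[0], move[1]) in _alive_stones(player, board):
--             if board != current_board and board != previous_board:
--                 best_valid_moves.append((move[0], move[1], dead_pieces))
--     return best_valid_moves
-- ===== Notes on version B (the rewrite author's own statement) =====
-- stated objective: alternative
-- what changed: Dead-stone and liberty detection is rewritten from A's per-stone stack flood fill (one DFS with list-membership scans per stone, re-run for every stone and for the played move) into a whole-board backward liberty fixpoint: seed the set of stones touching an empty cell, repeatedly add stones adjacent to already-alive stones until stable, then judge dead stones and the played move by set membership.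
import Mathlib
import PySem

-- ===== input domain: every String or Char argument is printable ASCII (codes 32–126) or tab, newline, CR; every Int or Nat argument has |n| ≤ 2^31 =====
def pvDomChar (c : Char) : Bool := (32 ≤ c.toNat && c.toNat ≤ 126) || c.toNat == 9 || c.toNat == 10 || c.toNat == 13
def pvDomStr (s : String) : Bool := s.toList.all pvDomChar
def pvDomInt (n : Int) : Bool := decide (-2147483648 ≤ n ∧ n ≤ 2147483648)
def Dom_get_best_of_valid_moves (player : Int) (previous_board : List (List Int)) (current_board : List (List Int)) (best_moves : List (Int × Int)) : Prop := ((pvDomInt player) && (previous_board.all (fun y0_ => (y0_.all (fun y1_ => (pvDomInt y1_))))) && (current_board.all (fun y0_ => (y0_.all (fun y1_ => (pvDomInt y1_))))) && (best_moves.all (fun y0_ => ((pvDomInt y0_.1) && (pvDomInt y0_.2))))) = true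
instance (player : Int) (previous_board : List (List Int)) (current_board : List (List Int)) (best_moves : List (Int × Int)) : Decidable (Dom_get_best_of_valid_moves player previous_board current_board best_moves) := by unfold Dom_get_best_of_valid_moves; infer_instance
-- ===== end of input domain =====

-- B replaces A's per-stone stack flood fill for dead-stone/liberty detection by a whole-board
-- backward liberty fixpoint (seed stones touching an empty cell, close under adjacency);
-- objective: alternative algorithm of similar cost.


-- ===== PORT A =====

def position_exists_on_board (row col : Int) : Bool :=
  if row < 0 || col < 0 || 5 ≤ row || 5 ≤ col then false else true

def get_adjacent_neighbours (row col : Int) : List (Int × Int) :=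
  let adjacent_neighbours : List (Int × Int) := []
  let adjacent_neighbours := if position_exists_on_board (row+1) col then adjacent_neighbours ++ [(row+1, col)] else adjacent_neighbours
  let adjacent_neighbours := if position_exists_on_board (row-1) col then adjacent_neighbours ++ [(row-1, col)] else adjacent_neighbours
  let adjacent_neighbours := if position_exists_on_board row (col+1) then adjacent_neighbours ++ [(row, col+1)] else adjacent_neighbours
  let adjacent_neighbours := if position_exists_on_board row (col-1) then adjacent_neighbours ++ [(row, col-1)] else adjacent_neighbours
  adjacent_neighbours

-- board[i][j]: exact for the in-range accesses both programs perform under Pre_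
def cellAt (board : List (List Int)) (i j : Int) : Int :=
  PySem.List.pyGetD (PySem.List.pyGetD board i []) j 0

-- the push loop `for blocks in adjacent_blocks: if blocks not in stack and blocks not in contiguous_blocks: stack.append(blocks)`
def fcb_push (stack contig : List (Int × Int)) (adjacent_blocks : List (Int × Int)) : List (Int × Int) :=
  adjacent_blocks.foldl (fun st blocks => if !(st.contains blocks) && !(contig.contains blocks) then st ++ [blocks] else st) stack

-- the `while stack:` loop; fuel 26 always suffices: each iteration appends one NEW element to
-- contiguous_blocks (pushes are deduplicated against stack and contiguous_blocks), and all
-- elements are the seed or one of the 25 board cells, so the stack empties within 26 pops.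
def fcb_loop (board : List (List Int)) (player : Int) :
    Nat → List (Int × Int) → List (Int × Int) → List (Int × Int)
  | 0, _, contiguous_blocks => contiguous_blocks
  | fuel+1, stack, contiguous_blocks =>
    match PySem.List.pop? stack (-1) with
    | none => contiguous_blocks
    | some (position, stack') =>
      let contiguous_blocks := contiguous_blocks ++ [position]
      let adjacent_neighbours := get_adjacent_neighbours position.1 position.2
      let adjacent_blocks := adjacent_neighbours.filter (fun adj_neigh => cellAt board adj_neigh.1 adj_neigh.2 == player)
      fcb_loop board player fuel (fcb_push stack' contiguous_blocks adjacent_blocks) contiguous_blocks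

def find_contiguous_blocks (i j : Int) (board : List (List Int)) (player : Int) : List (Int × Int) :=
  fcb_loop board player 26 [(i, j)] []

def get_unique_list (list : List (Int × Int)) : List (Int × Int) :=
  list.foldl (fun res i => if !(res.contains i) then res ++ [i] else res) []

def get_liberty_positions (i j : Int) (board : List (List Int)) (player : Int) : List (Int × Int) :=
  let contiguous_blocks := find_contiguous_blocks i j board player
  let liberties := contiguous_blocks.foldl (fun libs blocks =>
    (get_adjacent_neighbours blocks.1 blocks.2).foldl (fun libs2 neighbour =>
      if cellAt board neighbour.1 neighbour.2 == 0 then libs2 ++ [neighbour] else libs2) libs) []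
  get_unique_list liberties

def does_liberty_exists (i j : Int) (board : List (List Int)) (player : Int) : Bool :=
  let liberties := get_liberty_positions i j board player
  -- `liberties is not None` is always true
  if liberties.length > 0 then true else false

def find_dead_stones (player : Int) (board : List (List Int)) : List (Int × Int) :=
  (PySem.List.pyRange 0 5 1).foldl (fun dead i =>
    (PySem.List.pyRange 0 5 1).foldl (fun dead2 j =>
      if cellAt board i j == player then
        if !(does_liberty_exists i j board player) then dead2 ++ [(i, j)] else dead2
      else dead2) dead) []

-- board[i][j] = v: exact for the in-range writes performed under Pre_
def setCell (board : List (List Int)) (i j v : Int) : List (List Int) :=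
  PySem.List.pySetD board i (PySem.List.pySetD (PySem.List.pyGetD board i []) j v)

def clear_dead_stones (board : List (List Int)) (dead_pieces : List (Int × Int)) : List (List Int) :=
  dead_pieces.foldl (fun b piece => setCell b piece.1 piece.2 0) board

def place_stone (i j : Int) (board : List (List Int)) (player : Int) : List (List Int) :=
  setCell board i j player

def ko_rule_check (previous_board current_board updated_board : List (List Int)) : Bool :=
  if !(updated_board == current_board) && !(updated_board == previous_board) then true else false

def get_best_of_valid_moves (player : Int) (previous_board : List (List Int)) (current_board : List (List Int)) (best_moves : List (Int × Int)) : List (Int × Int × (List (Int × Int))) :=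
  best_moves.foldl (fun best_valid_moves move =>
    let copied_board := current_board   -- deepcopy: Lean values are immutable
    let copied_board := place_stone move.1 move.2 copied_board player
    let dead_pieces := find_dead_stones (3 - player) copied_board
    let copied_board := clear_dead_stones copied_board dead_pieces
    if does_liberty_exists move.1 move.2 copied_board player then
      if ko_rule_check previous_board current_board copied_board then
        best_valid_moves ++ [(move.1, move.2, dead_pieces)]
      else best_valid_moves
    else best_valid_moves) []

-- ===== PORT B =====

def altNeighbours (r c : Int) : List (Int × Int) :=
  ([((1:Int),(0:Int)), (-1,0), (0,1), (0,-1)]).foldl (fun out d =>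
    if 0 ≤ r + d.1 && r + d.1 < 5 && (0 ≤ c + d.2 && c + d.2 < 5) then out ++ [(r + d.1, c + d.2)] else out) []

def altAliveInit (player : Int) (board : List (List Int)) : PySem.Set (Int × Int) :=
  (PySem.List.pyRange 0 5 1).foldl (fun alive i =>
    (PySem.List.pyRange 0 5 1).foldl (fun alive2 j =>
      if cellAt board i j == player && (altNeighbours i j).any (fun n => cellAt board n.1 n.2 == 0)
      then PySem.Set.add alive2 (i, j) else alive2) alive) PySem.Set.empty

def altAliveStep (player : Int) (board : List (List Int)) (alive : PySem.Set (Int × Int)) : PySem.Set (Int × Int) :=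
  (PySem.List.pyRange 0 5 1).foldl (fun new i =>
    (PySem.List.pyRange 0 5 1).foldl (fun new2 j =>
      if cellAt board i j == player && !(PySem.Set.contains new2 (i, j)) && (altNeighbours i j).any (fun n => PySem.Set.contains alive n)
      then PySem.Set.add new2 (i, j) else new2) new) (PySem.Set.ofList alive)

def altAliveLoop (player : Int) (board : List (List Int)) : Nat → PySem.Set (Int × Int) → PySem.Set (Int × Int)
  | 0, alive => alive
  | fuel+1, alive =>
    let new := altAliveStep player board alive
    if PySem.Set.equal new alive then alive else altAliveLoop player board fuel new

def alt_alive_stones (player : Int) (board : List (List Int)) : PySem.Set (Int × Int) :=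
  altAliveLoop player board 25 (altAliveInit player board)

def get_best_of_valid_moves_alt (player : Int) (previous_board : List (List Int)) (current_board : List (List Int)) (best_moves : List (Int × Int)) : List (Int × Int × (List (Int × Int))) :=
  best_moves.foldl (fun best_valid_moves move =>
    let board := current_board          -- deepcopy: Lean values are immutable
    let board := setCell board move.1 move.2 player
    let opp_alive := alt_alive_stones (3 - player) board
    let dead_pieces := (PySem.List.pyRange 0 5 1).flatMap (fun i =>
      (PySem.List.pyRange 0 5 1).flatMap (fun j =>
        if cellAt board i j == 3 - player && !(PySem.Set.contains opp_alive (i, j)) then [(i, j)] else []))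
    let board := dead_pieces.foldl (fun b piece => setCell b piece.1 piece.2 0) board
    if PySem.Set.contains (alt_alive_stones player board) (move.1, move.2) then
      if !(board == current_board) && !(board == previous_board) then
        best_valid_moves ++ [(move.1, move.2, dead_pieces)]
      else best_valid_moves
    else best_valid_moves) []

-- ===== PRECONDITION & SPEC =====
-- Pre_ restricts to the agent's natural domain: when there are moves, the board offers at least the
-- 5x5 grid the program scans (A raises IndexError on smaller boards), and every candidate move is an
-- on-board coordinate; it excludes moves with out-of-[0,5) coordinates, on which A either raises or
-- returns a value that is an artefact of Python's negative-index wraparound / of a stone placed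
-- outside the scanned 5x5 grid.
def Pre_get_best_of_valid_moves (player : Int) (previous_board : List (List Int)) (current_board : List (List Int)) (best_moves : List (Int × Int)) : Prop :=
  (best_moves = [] ∨ (5 ≤ current_board.length ∧ ∀ k : Nat, k < 5 → 5 ≤ (current_board.getD k []).length)) ∧
  ∀ m ∈ best_moves, 0 ≤ m.1 ∧ m.1 < 5 ∧ 0 ≤ m.2 ∧ m.2 < 5
instance (player : Int) (previous_board : List (List Int)) (current_board : List (List Int)) (best_moves : List (Int × Int)) : Decidable (Pre_get_best_of_valid_moves player previous_board current_board best_moves) := by unfold Pre_get_best_of_valid_moves; infer_instance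

def pvWitness_get_best_of_valid_moves : Int × List (List Int) × List (List Int) × (List (Int × Int)) :=
  (1, [[0,0,0,0,0],[0,0,0,0,0],[0,0,0,0,0],[0,0,0,0,0],[0,0,0,0,0]],
      [[0,0,0,0,0],[0,0,0,0,0],[0,0,0,0,0],[0,0,0,0,0],[0,0,0,0,0]], [(2, 2)])

def Spec_get_best_of_valid_moves (player : Int) (previous_board : List (List Int)) (current_board : List (List Int)) (best_moves : List (Int × Int)) (out : List (Int × Int × (List (Int × Int)))) : Prop := out = get_best_of_valid_moves_alt player previous_board current_board best_moves
instance (player : Int) (previous_board : List (List Int)) (current_board : List (List Int)) (best_moves : List (Int × Int)) (out : List (Int × Int × (List (Int × Int)))) : Decidable (Spec_get_best_of_valid_moves player previous_board current_board best_moves out) := by unfold Spec_get_best_of_valid_moves; infer_instance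

-- ===== CLAIM (what is proved, stated in full; the proofs are below) =====
def Claim_equal_get_best_of_valid_moves : Prop := ∀ (player : Int) (previous_board : List (List Int)) (current_board : List (List Int)) (best_moves : List (Int × Int)), Dom_get_best_of_valid_moves player previous_board current_board best_moves → Pre_get_best_of_valid_moves player previous_board current_board best_moves → Spec_get_best_of_valid_moves player previous_board current_board best_moves (get_best_of_valid_moves player previous_board current_board best_moves)

-- ===== LEMMAS AND PROOFS =====

-- an on-board cell
def inR (c : Int × Int) : Prop := 0 ≤ c.1 ∧ c.1 < 5 ∧ 0 ≤ c.2 ∧ c.2 < 5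

-- one flood-fill step: b is an on-board neighbour of a carrying `pl`
def StepR (board : List (List Int)) (pl : Int) (a b : Int × Int) : Prop :=
  b ∈ get_adjacent_neighbours a.1 a.2 ∧ cellAt board b.1 b.2 = pl

def ReachR (board : List (List Int)) (pl : Int) : (Int × Int) → (Int × Int) → Prop :=
  Relation.ReflTransGen (StepR board pl)

def HasLibP (board : List (List Int)) (c : Int × Int) : Prop :=
  ∃ n ∈ get_adjacent_neighbours c.1 c.2, cellAt board n.1 n.2 = 0

-- the group reached from s (through `pl` stones) touches an empty cell
def AlivePr (board : List (List Int)) (pl : Int) (s : Int × Int) : Prop :=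
  ∃ c, ReachR board pl s c ∧ HasLibP board c

lemma peb_eq_decide (r c : Int) : position_exists_on_board r c = decide (0 ≤ r ∧ r < 5 ∧ 0 ≤ c ∧ c < 5) := by
  rw [Bool.eq_iff_iff]; simp [position_exists_on_board]; omega

lemma mem_adj_iff (r c : Int) (q : Int × Int) :
    q ∈ get_adjacent_neighbours r c ↔
      ((q = (r+1, c) ∨ q = (r-1, c) ∨ q = (r, c+1) ∨ q = (r, c-1)) ∧ inR q) := by
  rcases q with ⟨x, y⟩
  simp only [get_adjacent_neighbours, peb_eq_decide, decide_eq_true_eq]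
  split_ifs <;>
    (simp only [List.mem_append, List.mem_cons, List.not_mem_nil, or_false, false_or,
      Prod.mk.injEq, inR]) <;> (try omega) <;> (simp only [false_iff]; push Not; omega)

lemma inR_of_mem_adj {r c : Int} {q : Int × Int} (h : q ∈ get_adjacent_neighbours r c) : inR q :=
  ((mem_adj_iff r c q).1 h).2

lemma cond_eq (x y : Int) : (0 ≤ x && x < 5 && (0 ≤ y && y < 5)) = position_exists_on_board x y := by
  rw [Bool.eq_iff_iff]; simp [position_exists_on_board]; omega

lemma altNeighbours_eq (r c : Int) : altNeighbours r c = get_adjacent_neighbours r c := by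
  simp only [altNeighbours, get_adjacent_neighbours, List.foldl_cons, List.foldl_nil, cond_eq]
  norm_num [Int.sub_eq_add_neg]

-- all 25 board cells
def allCells : List (Int × Int) :=
  [(0,0),(0,1),(0,2),(0,3),(0,4),(1,0),(1,1),(1,2),(1,3),(1,4),(2,0),(2,1),(2,2),(2,3),(2,4),
   (3,0),(3,1),(3,2),(3,3),(3,4),(4,0),(4,1),(4,2),(4,3),(4,4)]

lemma mem_allCells (c : Int × Int) : c ∈ allCells ↔ inR c := by
  rcases c with ⟨x, y⟩
  constructor
  · intro h; fin_cases h <;> simp [inR]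
  · rintro ⟨h1, h2, h3, h4⟩
    interval_cases x <;> interval_cases y <;> simp [allCells]

lemma toFinset_sub {l : List (Int × Int)} (h : ∀ c ∈ l, inR c) : l.toFinset ⊆ allCells.toFinset := by
  intro c hc
  rw [List.mem_toFinset] at *
  exact (mem_allCells c).2 (h c hc)

lemma all_inR_mem_of_25 {l : List (Int × Int)} (hnd : l.Nodup) (h : ∀ c ∈ l, inR c)
    (hlen : 25 ≤ l.length) : ∀ c, inR c → c ∈ l := by
  intro c hc
  have hsub := toFinset_sub h
  have hcard : allCells.toFinset.card ≤ l.toFinset.card := by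
    rw [List.toFinset_card_of_nodup hnd, show allCells.toFinset.card = 25 by decide]
    exact hlen
  have heq := Finset.eq_of_subset_of_card_le hsub hcard
  have : c ∈ allCells.toFinset := by
    rw [List.mem_toFinset, mem_allCells]; exact hc
  rw [← heq, List.mem_toFinset] at this
  exact this

-- ---------- A side: the DFS computes the reachable group ----------

lemma fcb_push_mem (ct : List (Int × Int)) (l : List (Int × Int)) : ∀ (st : List (Int × Int)) (c : Int × Int),
    c ∈ fcb_push st ct l ↔ c ∈ st ∨ (c ∈ l ∧ c ∉ ct) := by
  induction l with
  | nil => intro st c; simp [fcb_push]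
  | cons b bs ih =>
    intro st c
    have hstep : fcb_push st ct (b :: bs) =
        fcb_push (if !(st.contains b) && !(ct.contains b) then st ++ [b] else st) ct bs := rfl
    rw [hstep, ih]
    by_cases h1 : b ∈ st <;> by_cases h2 : b ∈ ct <;>
      by_cases h3 : c = b <;>
      simp [h1, h2, h3]

lemma fcb_push_nodup (ct : List (Int × Int)) (l : List (Int × Int)) : ∀ (st : List (Int × Int)),
    (st ++ ct).Nodup → (fcb_push st ct l ++ ct).Nodup := by
  induction l with
  | nil => intro st hnd; exact hnd
  | cons b bs ih =>
    intro st hnd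
    have hstep : fcb_push st ct (b :: bs) =
        fcb_push (if !(st.contains b) && !(ct.contains b) then st ++ [b] else st) ct bs := rfl
    rw [hstep]
    apply ih
    split
    · next hcond =>
        have hb : b ∉ st ∧ b ∉ ct := by
          simpa [List.contains_iff_mem] using hcond
        rw [List.append_assoc, List.singleton_append, List.nodup_middle]
        exact List.nodup_cons.2 ⟨by simp [hb.1, hb.2], hnd⟩
    · exact hnd

lemma fcb_loop_spec (board : List (List Int)) (pl : Int) (seed : Int × Int) :
    ∀ (fuel : Nat) (stack contig : List (Int × Int)),
    (stack ++ contig).Nodup →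
    (∀ c ∈ stack ++ contig, c = seed ∨ inR c) →
    (∀ c ∈ stack ++ contig, ReachR board pl seed c) →
    (∀ a ∈ contig, ∀ b, StepR board pl a b → b ∈ stack ++ contig) →
    seed ∈ stack ++ contig →
    26 ≤ fuel + contig.length →
    (∀ c ∈ fcb_loop board pl fuel stack contig, ReachR board pl seed c) ∧
    (∀ a ∈ fcb_loop board pl fuel stack contig, ∀ b, StepR board pl a b → b ∈ fcb_loop board pl fuel stack contig) ∧
    seed ∈ fcb_loop board pl fuel stack contig := by
  intro fuel
  induction fuel with
  | zero =>
    intro stack contig hnd hU hreach hclosed hseed hfuel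
    have hstack : stack = [] := by
      rcases stack with _ | ⟨x, st⟩
      · rfl
      · exfalso
        have hndc : contig.Nodup := (List.nodup_append.1 hnd).2.1
        have hsubU : contig.toFinset ⊆ insert seed allCells.toFinset := by
          intro c hc
          rw [List.mem_toFinset] at hc
          rcases hU c (by simp [hc]) with rfl | hr
          · exact Finset.mem_insert_self _ _
          · exact Finset.mem_insert_of_mem (by rw [List.mem_toFinset, mem_allCells]; exact hr)
        have hcard : (insert seed allCells.toFinset).card ≤ contig.toFinset.card := by
          have h1 := Finset.card_insert_le seed allCells.toFinset
          have h2 : allCells.toFinset.card = 25 := by decide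
          rw [List.toFinset_card_of_nodup hndc]
          omega
        have heq := Finset.eq_of_subset_of_card_le hsubU hcard
        have hxU : x ∈ insert seed allCells.toFinset := by
          rcases hU x (by simp) with rfl | hr
          · exact Finset.mem_insert_self _ _
          · exact Finset.mem_insert_of_mem (by rw [List.mem_toFinset, mem_allCells]; exact hr)
        rw [← heq, List.mem_toFinset] at hxU
        have hdisj := List.disjoint_of_nodup_append hnd
        exact hdisj (by simp) hxU
    subst hstack
    simp only [List.nil_append] at hreach hclosed hseed
    exact ⟨hreach, fun a ha b hb => hclosed a ha b hb, hseed⟩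
  | succ fuel ih =>
    intro stack contig hnd hU hreach hclosed hseed hfuel
    rcases List.eq_nil_or_concat stack with rfl | ⟨s', pos, rfl⟩
    · have hres : fcb_loop board pl (fuel+1) [] contig = contig := by
        simp [fcb_loop, PySem.List.pop?]
      rw [hres]
      simp only [List.nil_append] at hreach hclosed hseed
      exact ⟨hreach, fun a ha b hb => hclosed a ha b hb, hseed⟩
    · rw [List.concat_eq_append] at hnd hU hreach hclosed hseed ⊢
      set blocks := (get_adjacent_neighbours pos.1 pos.2).filter
        (fun adj_neigh => cellAt board adj_neigh.1 adj_neigh.2 == pl) with hblocks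
      have hloop : fcb_loop board pl (fuel+1) (s' ++ [pos]) contig =
          fcb_loop board pl fuel (fcb_push s' (contig ++ [pos]) blocks) (contig ++ [pos]) := by
        simp [fcb_loop, PySem.List.pop?_last, hblocks]
      rw [hloop]
      -- facts about blocks
      have hblockstep : ∀ b ∈ blocks, StepR board pl pos b := by
        intro b hb
        rw [hblocks, List.mem_filter] at hb
        exact ⟨hb.1, by simpa using hb.2⟩
      have hposreach : ReachR board pl seed pos := hreach pos (by simp)
      apply ih
      · -- nodup
        apply fcb_push_nodup
        have hperm : (s' ++ [pos] ++ contig).Perm (s' ++ (contig ++ [pos])) := by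
          rw [List.append_assoc]
          exact List.Perm.append_left s' (List.perm_append_comm)
        exact hperm.nodup hnd
      · -- hU
        intro c hc
        rcases List.mem_append.1 hc with hc | hc
        · rcases (fcb_push_mem _ _ _ _).1 hc with hc' | hc'
          · exact hU c (by simp [hc'])
          · exact Or.inr (inR_of_mem_adj (List.mem_filter.1 (hblocks ▸ hc'.1)).1)
        · rcases List.mem_append.1 hc with hc' | hc'
          · exact hU c (by simp [hc'])
          · simp at hc'; subst hc'; exact hU c (by simp)
      · -- reach
        intro c hc
        rcases List.mem_append.1 hc with hc | hc
        · rcases (fcb_push_mem _ _ _ _).1 hc with hc' | hc'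
          · exact hreach c (by simp [hc'])
          · exact hposreach.tail (hblockstep c hc'.1)
        · rcases List.mem_append.1 hc with hc' | hc'
          · exact hreach c (by simp [hc'])
          · simp at hc'; subst hc'; exact hposreach
      · -- closed
        intro a ha b hb
        rcases List.mem_append.1 ha with ha' | ha'
        · -- a ∈ contig
          have hold := hclosed a ha' b hb
          rcases List.mem_append.1 hold with h1 | h1
          · rcases List.mem_append.1 h1 with h2 | h2
            · exact List.mem_append.2 (Or.inl ((fcb_push_mem _ _ _ _).2 (Or.inl h2)))
            · simp at h2; subst h2; simp
          · simp [h1]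
        · -- a = pos
          simp at ha'
          rw [ha'] at hb
          have hbblocks : b ∈ blocks := by
            rw [hblocks, List.mem_filter]
            exact ⟨hb.1, by simp [hb.2]⟩
          by_cases hbc : b ∈ contig ++ [pos]
          · exact List.mem_append.2 (Or.inr hbc)
          · exact List.mem_append.2 (Or.inl ((fcb_push_mem _ _ _ _).2 (Or.inr ⟨hbblocks, hbc⟩)))
      · -- seed
        rcases List.mem_append.1 hseed with h1 | h1
        · rcases List.mem_append.1 h1 with h2 | h2
          · exact List.mem_append.2 (Or.inl ((fcb_push_mem _ _ _ _).2 (Or.inl h2)))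
          · simp at h2; subst h2; simp
        · simp [h1]
      · -- fuel
        simp only [List.length_append, List.length_cons, List.length_nil]
        omega

lemma fcb_spec (i j : Int) (board : List (List Int)) (pl : Int) :
    (∀ c ∈ find_contiguous_blocks i j board pl, ReachR board pl (i, j) c) ∧
    (∀ a ∈ find_contiguous_blocks i j board pl, ∀ b, StepR board pl a b → b ∈ find_contiguous_blocks i j board pl) ∧
    (i, j) ∈ find_contiguous_blocks i j board pl := by
  have h := fcb_loop_spec board pl (i, j) 26 [(i, j)] []
  simp only [List.append_nil] at h
  exact h (by simp) (fun c hc => by simp at hc; simp [hc])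
    (fun c hc => by simp at hc; subst hc; exact Relation.ReflTransGen.refl)
    (fun a ha => by simp at ha) (by simp) (by simp)

lemma reach_mem_fcb {i j : Int} {board : List (List Int)} {pl : Int} {c : Int × Int}
    (h : ReachR board pl (i, j) c) : c ∈ find_contiguous_blocks i j board pl := by
  obtain ⟨hsound, hclosed, hseed⟩ := fcb_spec i j board pl
  induction h with
  | refl => exact hseed
  | tail hab hstep ihmem => exact hclosed _ ihmem _ hstep

lemma get_unique_list_eq (l : List (Int × Int)) : get_unique_list l = PySem.Set.ofList l := by
  rw [get_unique_list, PySem.Set.ofList_eq_foldl]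
  apply PySem.List.foldl_congr_mem
  intro acc x _
  by_cases h : x ∈ acc
  · simp [h, PySem.Set.add_of_mem]
  · simp [h, PySem.Set.add_of_not_mem]

lemma ofList_eq_nil_iff (l : List (Int × Int)) : PySem.Set.ofList l = [] ↔ l = [] := by
  cases l with
  | nil => simp
  | cons x xs =>
    simp only [PySem.Set.ofList_cons]
    constructor <;> intro h <;> simp_all

lemma ite_len_iff (X : List (Int × Int)) (A : Prop) (h : X ≠ [] ↔ A) :
    ((if X.length > 0 then true else false) = true ↔ A) := by
  split_ifs with hl
  · exact ⟨fun _ => h.1 (List.length_pos_iff.1 hl), fun _ => rfl⟩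
  · constructor
    · intro hfalse; exact absurd hfalse (by simp)
    · intro ha
      exact absurd (List.length_pos_iff.2 (h.2 ha)) hl

lemma dle_iff (i j : Int) (board : List (List Int)) (pl : Int) :
    does_liberty_exists i j board pl = true ↔ AlivePr board pl (i, j) := by
  simp only [does_liberty_exists, get_liberty_positions]
  obtain ⟨hsound, hclosed, hseed⟩ := fcb_spec i j board pl
  set C := find_contiguous_blocks i j board pl with hC
  clear_value C
  refine ite_len_iff _ _ ?_
  rw [get_unique_list_eq]
  have hinner : ∀ (libs : List (Int × Int)) (b : Int × Int),
      (get_adjacent_neighbours b.1 b.2).foldl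
        (fun libs2 neighbour => if cellAt board neighbour.1 neighbour.2 == 0 then libs2 ++ [neighbour] else libs2) libs
      = libs ++ (get_adjacent_neighbours b.1 b.2).filter (fun n => cellAt board n.1 n.2 == 0) := by
    intro libs b
    have h := PySem.List.foldl_append_if (fun (n : Int × Int) => cellAt board n.1 n.2 == 0)
      (fun n => n) (get_adjacent_neighbours b.1 b.2) libs
    simpa using h
  simp only [hinner]
  rw [PySem.List.foldl_append_eq_flatMap, List.nil_append]
  rw [ne_eq, ofList_eq_nil_iff, ← ne_eq]
  constructor
  · intro hne
    rw [← List.isEmpty_eq_false_iff, List.isEmpty_eq_false_iff_exists_mem] at hne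
    obtain ⟨x, hx⟩ := hne
    rw [List.mem_flatMap] at hx
    obtain ⟨b, hb, hxb⟩ := hx
    rw [List.mem_filter] at hxb
    exact ⟨b, hsound b (hC ▸ hb), x, hxb.1, by simpa using hxb.2⟩
  · rintro ⟨c, hr, n, hn, h0⟩
    have hc : c ∈ C := hC ▸ reach_mem_fcb hr
    intro hz
    rw [List.flatMap_eq_nil_iff] at hz
    have h2 := hz c (hC ▸ hc)
    have h3 : n ∈ (get_adjacent_neighbours c.1 c.2).filter (fun nn => cellAt board nn.1 nn.2 == 0) :=
      List.mem_filter.2 ⟨hn, by simp [h0]⟩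
    rw [h2] at h3
    simp at h3

-- ---------- B side: the fixpoint computes the alive stones ----------

lemma rowscan_spec (f : Int → Int → Bool) (i : Int) :
    ∀ (js : List Int) (acc : PySem.Set (Int × Int)), acc.Nodup →
    (∀ c : Int × Int, c ∈ js.foldl (fun a2 j => if f i j then PySem.Set.add a2 (i, j) else a2) acc ↔
        c ∈ acc ∨ ∃ j ∈ js, f i j = true ∧ c = (i, j)) ∧
    (js.foldl (fun a2 j => if f i j then PySem.Set.add a2 (i, j) else a2) acc).Nodup := by
  intro js
  induction js with
  | nil => intro acc hnd; exact ⟨fun c => by simp, hnd⟩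
  | cons b bs ih =>
    intro acc hnd
    simp only [List.foldl_cons]
    by_cases hb : f i b = true
    · rw [if_pos hb]
      obtain ⟨h1, h2⟩ := ih (acc.add (i, b)) (PySem.Set.nodup_add _ _ hnd)
      refine ⟨fun c => ?_, h2⟩
      rw [h1 c, PySem.Set.mem_add]
      constructor
      · rintro ((h | h) | h)
        · exact Or.inl h
        · exact Or.inr ⟨b, by simp, hb, h⟩
        · obtain ⟨j, hj, hfj, hc⟩ := h; exact Or.inr ⟨j, by simp [hj], hfj, hc⟩
      · rintro (h | ⟨j, hj, hfj, hc⟩)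
        · exact Or.inl (Or.inl h)
        · rcases List.mem_cons.1 hj with rfl | hj'
          · exact Or.inl (Or.inr hc)
          · exact Or.inr ⟨j, hj', hfj, hc⟩
    · rw [if_neg hb]
      obtain ⟨h1, h2⟩ := ih acc hnd
      refine ⟨fun c => ?_, h2⟩
      rw [h1 c]
      constructor
      · rintro (h | ⟨j, hj, hfj, hc⟩)
        · exact Or.inl h
        · exact Or.inr ⟨j, by simp [hj], hfj, hc⟩
      · rintro (h | ⟨j, hj, hfj, hc⟩)
        · exact Or.inl h
        · rcases List.mem_cons.1 hj with rfl | hj'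
          · exact absurd hfj hb
          · exact Or.inr ⟨j, hj', hfj, hc⟩

lemma fullscan_spec (f : Int → Int → Bool) (s0 : PySem.Set (Int × Int)) (hnd : s0.Nodup) :
    (∀ c : Int × Int, c ∈ (PySem.List.pyRange 0 5 1).foldl (fun acc i =>
        (PySem.List.pyRange 0 5 1).foldl (fun a2 j => if f i j then PySem.Set.add a2 (i, j) else a2) acc) s0 ↔
        c ∈ s0 ∨ (inR c ∧ f c.1 c.2 = true)) ∧
    ((PySem.List.pyRange 0 5 1).foldl (fun acc i =>
        (PySem.List.pyRange 0 5 1).foldl (fun a2 j => if f i j then PySem.Set.add a2 (i, j) else a2) acc) s0).Nodup := by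
  have hcol : ∀ (is : List Int) (acc : PySem.Set (Int × Int)), acc.Nodup →
      (∀ c : Int × Int, c ∈ is.foldl (fun acc i =>
          (PySem.List.pyRange 0 5 1).foldl (fun a2 j => if f i j then PySem.Set.add a2 (i, j) else a2) acc) acc ↔
        c ∈ acc ∨ ∃ i ∈ is, ∃ j ∈ PySem.List.pyRange 0 5 1, f i j = true ∧ c = (i, j)) ∧
      (is.foldl (fun acc i =>
          (PySem.List.pyRange 0 5 1).foldl (fun a2 j => if f i j then PySem.Set.add a2 (i, j) else a2) acc) acc).Nodup := by
    intro is
    induction is with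
    | nil => intro acc hnd; exact ⟨fun c => by simp, hnd⟩
    | cons a as ih =>
      intro acc hnd
      simp only [List.foldl_cons]
      obtain ⟨r1, r2⟩ := rowscan_spec f a (PySem.List.pyRange 0 5 1) acc hnd
      obtain ⟨h1, h2⟩ := ih _ r2
      refine ⟨fun c => ?_, h2⟩
      rw [h1 c, r1 c]
      constructor
      · rintro ((h | ⟨j, hj, hfj, hc⟩) | ⟨i, hi, j, hj, hfj, hc⟩)
        · exact Or.inl h
        · exact Or.inr ⟨a, by simp, j, hj, hfj, hc⟩
        · exact Or.inr ⟨i, by simp [hi], j, hj, hfj, hc⟩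
      · rintro (h | ⟨i, hi, j, hj, hfj, hc⟩)
        · exact Or.inl (Or.inl h)
        · rcases List.mem_cons.1 hi with rfl | hi'
          · exact Or.inl (Or.inr ⟨j, hj, hfj, hc⟩)
          · exact Or.inr ⟨i, hi', j, hj, hfj, hc⟩
  obtain ⟨h1, h2⟩ := hcol (PySem.List.pyRange 0 5 1) s0 hnd
  refine ⟨fun c => ?_, h2⟩
  rw [h1 c]
  constructor
  · rintro (h | ⟨i, hi, j, hj, hfj, rfl⟩)
    · exact Or.inl h
    · rw [PySem.List.mem_pyRange_one] at hi hj
      exact Or.inr ⟨⟨hi.1, hi.2, hj.1, hj.2⟩, hfj⟩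
  · rintro (h | ⟨⟨h1', h2', h3', h4'⟩, hf⟩)
    · exact Or.inl h
    · rcases c with ⟨x, y⟩
      exact Or.inr ⟨x, PySem.List.mem_pyRange_one.2 ⟨h1', h2'⟩, y, PySem.List.mem_pyRange_one.2 ⟨h3', h4'⟩, hf, rfl⟩

lemma altAliveStep_spec (pl : Int) (board : List (List Int)) (alive : PySem.Set (Int × Int)) :
    (∀ c : Int × Int, c ∈ altAliveStep pl board alive ↔
        c ∈ alive ∨ (inR c ∧ cellAt board c.1 c.2 = pl ∧ ∃ n ∈ get_adjacent_neighbours c.1 c.2, n ∈ alive)) ∧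
    (altAliveStep pl board alive).Nodup := by
  have hfun : ∀ i : Int, (fun (new2 : PySem.Set (Int × Int)) j =>
      if cellAt board i j == pl && !(PySem.Set.contains new2 (i, j)) && (altNeighbours i j).any (fun n => PySem.Set.contains alive n)
      then PySem.Set.add new2 (i, j) else new2)
      = (fun (new2 : PySem.Set (Int × Int)) j =>
      if cellAt board i j == pl && (altNeighbours i j).any (fun n => PySem.Set.contains alive n)
      then PySem.Set.add new2 (i, j) else new2) := by
    intro i; funext new2 j
    by_cases hc : (i, j) ∈ new2
    · have hct : PySem.Set.contains new2 (i, j) = true := (PySem.Set.contains_iff _ _).2 hc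
      rw [hct]
      simp only [Bool.not_true, Bool.and_false, Bool.false_and]
      split_ifs <;> simp [PySem.Set.add_of_mem hc]
    · have hct : PySem.Set.contains new2 (i, j) = false := by
        rw [Bool.eq_false_iff]; intro h; exact hc ((PySem.Set.contains_iff _ _).1 h)
      rw [hct]
      simp only [Bool.not_false, Bool.and_true]
  have hstep : altAliveStep pl board alive = (PySem.List.pyRange 0 5 1).foldl (fun acc i =>
      (PySem.List.pyRange 0 5 1).foldl (fun a2 j =>
        if cellAt board i j == pl && (altNeighbours i j).any (fun n => PySem.Set.contains alive n)
        then PySem.Set.add a2 (i, j) else a2) acc) (PySem.Set.ofList alive) := by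
    simp only [altAliveStep, hfun]
  rw [hstep]
  obtain ⟨h1, h2⟩ := fullscan_spec (fun i j => cellAt board i j == pl && (altNeighbours i j).any (fun n => PySem.Set.contains alive n))
      (PySem.Set.ofList alive) (PySem.Set.nodup_ofList _)
  refine ⟨fun c => ?_, h2⟩
  rw [h1 c, PySem.Set.mem_ofList]
  have hg : (cellAt board c.1 c.2 == pl && (altNeighbours c.1 c.2).any (fun n => PySem.Set.contains alive n)) = true ↔
      (cellAt board c.1 c.2 = pl ∧ ∃ n ∈ get_adjacent_neighbours c.1 c.2, n ∈ alive) := by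
    rw [altNeighbours_eq]
    simp [List.any_eq_true]
  rw [hg]

lemma altAliveLoop_spec (pl : Int) (board : List (List Int)) :
    ∀ (fuel : Nat) (alive : PySem.Set (Int × Int)),
    alive.Nodup →
    (∀ c ∈ alive, inR c ∧ cellAt board c.1 c.2 = pl ∧ AlivePr board pl c) →
    25 ≤ fuel + alive.length →
    (∀ c : Int × Int, c ∈ altAliveStep pl board (altAliveLoop pl board fuel alive) ↔ c ∈ altAliveLoop pl board fuel alive) ∧
    (∀ c ∈ altAliveLoop pl board fuel alive, inR c ∧ cellAt board c.1 c.2 = pl ∧ AlivePr board pl c) ∧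
    (∀ c ∈ alive, c ∈ altAliveLoop pl board fuel alive) ∧
    (altAliveLoop pl board fuel alive).Nodup := by
  intro fuel
  induction fuel with
  | zero =>
    intro alive hnd hInv hfuel
    have hres : altAliveLoop pl board 0 alive = alive := rfl
    rw [hres]
    obtain ⟨s1, s2⟩ := altAliveStep_spec pl board alive
    refine ⟨fun c => ?_, hInv, fun c hc => hc, hnd⟩
    rw [s1 c]
    constructor
    · rintro (h | ⟨h1, _, _⟩)
      · exact h
      · exact all_inR_mem_of_25 hnd (fun d hd => (hInv d hd).1) (by omega) c h1
    · exact Or.inl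
  | succ fuel ih =>
    intro alive hnd hInv hfuel
    obtain ⟨s1, s2⟩ := altAliveStep_spec pl board alive
    by_cases heq : PySem.Set.equal (altAliveStep pl board alive) alive = true
    · have hres : altAliveLoop pl board (fuel+1) alive = alive := by
        simp [altAliveLoop, heq]
      rw [hres]
      have hiff := (PySem.Set.equal_iff _ _).1 heq
      exact ⟨hiff, hInv, fun c hc => hc, hnd⟩
    · have hres : altAliveLoop pl board (fuel+1) alive = altAliveLoop pl board fuel (altAliveStep pl board alive) := by
        simp [altAliveLoop, heq]
      rw [hres]
      -- invariants for the stepped set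
      have hsub : ∀ c ∈ alive, c ∈ altAliveStep pl board alive := fun c hc => (s1 c).2 (Or.inl hc)
      have hInv' : ∀ c ∈ altAliveStep pl board alive, inR c ∧ cellAt board c.1 c.2 = pl ∧ AlivePr board pl c := by
        intro c hc
        rcases (s1 c).1 hc with h | ⟨h1, h2, n, hn, hna⟩
        · exact hInv c h
        · obtain ⟨-, hcn, he, hre, hlib⟩ := hInv n hna
          exact ⟨h1, h2, he, Relation.ReflTransGen.head ⟨hn, hcn⟩ hre, hlib⟩
      have hlen : alive.length < (altAliveStep pl board alive).length := by
        have hx : ∃ x, x ∈ altAliveStep pl board alive ∧ x ∉ alive := by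
          by_contra hno
          push Not at hno
          exact heq ((PySem.Set.equal_iff _ _).2 (fun x => ⟨fun hx => hno x hx, fun hx => hsub x hx⟩))
        obtain ⟨x, hx1, hx2⟩ := hx
        have hss : alive.toFinset ⊂ (altAliveStep pl board alive).toFinset := by
          constructor
          · intro d hd; rw [List.mem_toFinset] at *; exact hsub d hd
          · intro hcontra
            exact hx2 (List.mem_toFinset.1 (hcontra (List.mem_toFinset.2 hx1)))
        have := Finset.card_lt_card hss
        rwa [List.toFinset_card_of_nodup hnd, List.toFinset_card_of_nodup s2] at this
      obtain ⟨c1, c2, c3, c4⟩ := ih (altAliveStep pl board alive) s2 hInv' (by omega)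
      exact ⟨c1, c2, fun c hc => c3 c (hsub c hc), c4⟩

lemma altAliveInit_spec (pl : Int) (board : List (List Int)) :
    (∀ c : Int × Int, c ∈ altAliveInit pl board ↔ inR c ∧ cellAt board c.1 c.2 = pl ∧ HasLibP board c) ∧
    (altAliveInit pl board).Nodup := by
  obtain ⟨h1, h2⟩ := fullscan_spec (fun i j => cellAt board i j == pl && (altNeighbours i j).any (fun n => cellAt board n.1 n.2 == 0))
      PySem.Set.empty (by simp [PySem.Set.empty])
  refine ⟨fun c => ?_, h2⟩
  unfold altAliveInit
  rw [h1 c]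
  have hg : (cellAt board c.1 c.2 == pl && (altNeighbours c.1 c.2).any (fun n => cellAt board n.1 n.2 == 0)) = true ↔
      (cellAt board c.1 c.2 = pl ∧ HasLibP board c) := by
    rw [altNeighbours_eq]
    simp [HasLibP, List.any_eq_true]
  rw [hg]
  simp [PySem.Set.empty]

lemma alive_mem (pl : Int) (board : List (List Int)) (c : Int × Int) :
    c ∈ alt_alive_stones pl board ↔ inR c ∧ cellAt board c.1 c.2 = pl ∧ AlivePr board pl c := by
  obtain ⟨i1, i2⟩ := altAliveInit_spec pl board
  have hInv0 : ∀ d ∈ altAliveInit pl board, inR d ∧ cellAt board d.1 d.2 = pl ∧ AlivePr board pl d := by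
    intro d hd
    obtain ⟨h1, h2, h3⟩ := (i1 d).1 hd
    exact ⟨h1, h2, d, Relation.ReflTransGen.refl, h3⟩
  obtain ⟨hfix, hsound, hsub, hnodF⟩ := altAliveLoop_spec pl board 25 (altAliveInit pl board) i2 hInv0 (by omega)
  constructor
  · intro hc
    exact hsound c hc
  · rintro ⟨hinR, hcell, e, hre, hlib⟩
    show c ∈ altAliveLoop pl board 25 (altAliveInit pl board)
    revert hinR hcell
    induction hre using Relation.ReflTransGen.head_induction_on with
    | refl =>
      intro hinR hcell
      exact hsub e ((i1 e).2 ⟨hinR, hcell, hlib⟩)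
    | head hstep hrest ihm =>
      rename_i a c'
      intro hinR hcell
      have hc' : c' ∈ altAliveLoop pl board 25 (altAliveInit pl board) :=
        ihm (inR_of_mem_adj hstep.1) hstep.2
      obtain ⟨s1, _⟩ := altAliveStep_spec pl board _
      exact (hfix a).1 ((s1 a).2 (Or.inr ⟨hinR, hcell, c', hstep.1, hc'⟩))

-- ---------- glue ----------

lemma dle_eq_contains (board : List (List Int)) (pl : Int) (i j : Int)
    (hin : inR (i, j)) (hc : cellAt board i j = pl) :
    does_liberty_exists i j board pl = PySem.Set.contains (alt_alive_stones pl board) (i, j) := by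
  have h1 := dle_iff i j board pl
  have h2 := alive_mem pl board (i, j)
  rw [Bool.eq_iff_iff, h1, PySem.Set.contains_iff, h2]
  constructor
  · intro ha; exact ⟨hin, hc, ha⟩
  · intro hmem; exact hmem.2.2

lemma flatMap_if_singleton (g : Int → Bool) (f : Int → (Int × Int)) (l : List Int) :
    l.flatMap (fun j => if g j then [f j] else []) = (l.filter g).map f := by
  induction l with
  | nil => simp
  | cons a as ih => by_cases h : g a = true <;> simp [h, ih]

lemma dead_eq (pl : Int) (board : List (List Int)) :
    find_dead_stones pl board = (PySem.List.pyRange 0 5 1).flatMap (fun i =>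
      (PySem.List.pyRange 0 5 1).flatMap (fun j =>
        if cellAt board i j == pl && !(PySem.Set.contains (alt_alive_stones pl board) (i, j)) then [(i, j)] else [])) := by
  have hbody : ∀ i : Int, (fun (dead2 : List (Int × Int)) j =>
      if cellAt board i j == pl then
        if !(does_liberty_exists i j board pl) then dead2 ++ [(i, j)] else dead2
      else dead2)
      = (fun (dead2 : List (Int × Int)) j =>
      if cellAt board i j == pl && !(does_liberty_exists i j board pl) then dead2 ++ [(i, j)] else dead2) := by
    intro i; funext d j
    by_cases h1 : (cellAt board i j == pl) = true
    · by_cases h2 : does_liberty_exists i j board pl = true <;> simp [h1, h2]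
    · rw [Bool.not_eq_true] at h1; simp [h1]
  unfold find_dead_stones
  simp only [hbody]
  have hinner2 : ∀ (d : List (Int × Int)) (i : Int),
      (PySem.List.pyRange 0 5 1).foldl (fun dead2 j =>
        if cellAt board i j == pl && !(does_liberty_exists i j board pl) then dead2 ++ [(i, j)] else dead2) d
      = d ++ ((PySem.List.pyRange 0 5 1).filter
          (fun j => cellAt board i j == pl && !(does_liberty_exists i j board pl))).map (fun j => (i, j)) := by
    intro d i
    have h := PySem.List.foldl_append_if
      (fun j => cellAt board i j == pl && !(does_liberty_exists i j board pl))
      (fun j => ((i, j) : Int × Int)) (PySem.List.pyRange 0 5 1) d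
    simpa using h
  simp only [hinner2]
  rw [PySem.List.foldl_append_eq_flatMap, List.nil_append]
  apply List.flatMap_congr
  intro i hi
  rw [flatMap_if_singleton]
  congr 1
  apply List.filter_congr
  intro j hj
  by_cases hcell : (cellAt board i j == pl) = true
  · have hin : inR (i, j) := by
      rw [PySem.List.mem_pyRange_one] at hi hj
      exact ⟨hi.1, hi.2, hj.1, hj.2⟩
    have hd := dle_eq_contains board pl i j hin (by simpa using hcell)
    rw [hd]
  · rw [Bool.not_eq_true] at hcell; rw [hcell]; simp

def Shape (b : List (List Int)) : Prop := 5 ≤ b.length ∧ ∀ k : Nat, k < 5 → 5 ≤ (b.getD k []).length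

lemma cellAt_setCell_self {b : List (List Int)} {i j : Int} (v : Int) (h : inR (i, j)) (hs : Shape b) :
    cellAt (setCell b i j v) i j = v := by
  obtain ⟨h1, h2, h3, h4⟩ := h
  obtain ⟨hb, hrow⟩ := hs
  have hilen : i.toNat < b.length := by omega
  have hrowlen : 5 ≤ b[i.toNat].length := by
    have := hrow i.toNat (by omega)
    rwa [List.getD_eq_getElem b [] hilen] at this
  rw [cellAt, setCell]
  rw [PySem.List.pySetD_of_nonneg (PySem.List.pyGetD b i []) v h3]
  rw [PySem.List.pySetD_of_nonneg b _ h1]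
  rw [PySem.List.pyGetD_eq_getElem _ [] h1 (by rw [List.length_set]; omega)]
  rw [List.getElem_set_self]
  have hpg : PySem.List.pyGetD b i [] = b[i.toNat] :=
    PySem.List.pyGetD_eq_getElem b [] h1 (by omega)
  rw [PySem.List.pyGetD_eq_getElem _ 0 h3 (by rw [List.length_set, hpg]; omega)]
  rw [List.getElem_set_self]

lemma cellAt_setCell_ne {b : List (List Int)} {i j x y : Int} (v : Int) (hs : Shape b)
    (hij : inR (i, j)) (hxy : inR (x, y)) (hne : (x, y) ≠ (i, j)) :
    cellAt (setCell b i j v) x y = cellAt b x y := by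
  obtain ⟨h1, h2, h3, h4⟩ := hij
  obtain ⟨g1, g2, g3, g4⟩ := hxy
  obtain ⟨hb, hrow⟩ := hs
  have hilen : i.toNat < b.length := by omega
  have hxlen : x.toNat < b.length := by omega
  have hrowleni : 5 ≤ b[i.toNat].length := by
    have := hrow i.toNat (by omega); rwa [List.getD_eq_getElem b [] hilen] at this
  have hrowlenx : 5 ≤ b[x.toNat].length := by
    have := hrow x.toNat (by omega); rwa [List.getD_eq_getElem b [] hxlen] at this
  have hpgi : PySem.List.pyGetD b i [] = b[i.toNat] := PySem.List.pyGetD_eq_getElem b [] h1 (by omega)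
  have hpgx : PySem.List.pyGetD b x [] = b[x.toNat] := PySem.List.pyGetD_eq_getElem b [] g1 (by omega)
  rw [cellAt, cellAt, setCell]
  rw [PySem.List.pySetD_of_nonneg (PySem.List.pyGetD b i []) v h3]
  rw [PySem.List.pySetD_of_nonneg b _ h1]
  by_cases hxi : x = i
  · -- same row, different column
    subst hxi
    have hyj : y ≠ j := by
      intro hyj; exact hne (by rw [hyj])
    rw [PySem.List.pyGetD_eq_getElem _ [] g1 (by rw [List.length_set]; omega)]
    rw [List.getElem_set_self]
    rw [hpgx]
    rw [PySem.List.pyGetD_eq_getElem _ 0 g3 (by rw [List.length_set]; omega)]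
    rw [PySem.List.pyGetD_eq_getElem _ 0 g3 (by omega)]
    rw [List.getElem_set_ne (by omega)]
  · -- different row
    rw [PySem.List.pyGetD_eq_getElem _ [] g1 (by rw [List.length_set]; omega)]
    rw [List.getElem_set_ne (by omega)]
    rw [hpgx]

lemma shape_setCell {b : List (List Int)} {i j : Int} (v : Int) (h : inR (i, j)) (hs : Shape b) :
    Shape (setCell b i j v) := by
  obtain ⟨h1, h2, h3, h4⟩ := h
  obtain ⟨hb, hrow⟩ := hs
  refine ⟨by rw [setCell, PySem.List.length_pySetD]; exact hb, ?_⟩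
  intro k hk
  rw [setCell, PySem.List.pySetD_of_nonneg b _ h1]
  have hklen : k < b.length := by omega
  rw [List.getD_eq_getElem _ [] (by rw [List.length_set]; omega)]
  by_cases hik : i.toNat = k
  · subst hik
    rw [List.getElem_set_self]
    rw [PySem.List.length_pySetD]
    have hgd : PySem.List.pyGetD b i [] = b[i.toNat] := PySem.List.pyGetD_eq_getElem b [] h1 (by omega)
    rw [hgd]
    have := hrow i.toNat hk
    rwa [List.getD_eq_getElem b [] hklen] at this
  · rw [List.getElem_set_ne hik]
    have := hrow k hk
    rwa [List.getD_eq_getElem b [] hklen] at this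

lemma clear_spec (dead : List (Int × Int)) (b : List (List Int)) (hs : Shape b)
    (hd : ∀ d ∈ dead, inR d) :
    Shape (dead.foldl (fun bb piece => setCell bb piece.1 piece.2 0) b) ∧
    (∀ y : Int × Int, inR y → (∀ d ∈ dead, d ≠ y) →
      cellAt (dead.foldl (fun bb piece => setCell bb piece.1 piece.2 0) b) y.1 y.2 = cellAt b y.1 y.2) := by
  induction dead generalizing b with
  | nil => exact ⟨hs, fun y _ _ => rfl⟩
  | cons d ds ih =>
    simp only [List.foldl_cons]
    have hdin : inR d := hd d (by simp)
    have hdin' : inR (d.1, d.2) := hdin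
    obtain ⟨hS', hcell'⟩ := ih (setCell b d.1 d.2 0) (shape_setCell 0 hdin' hs) (fun e he => hd e (by simp [he]))
    refine ⟨hS', fun y hy hne => ?_⟩
    rw [hcell' y hy (fun e he => hne e (List.mem_cons_of_mem _ he))]
    have hyne : ((y.1, y.2) : Int × Int) ≠ (d.1, d.2) := by
      intro heq
      apply hne d (by simp)
      have : y = d := by
        rcases y with ⟨y1, y2⟩; rcases d with ⟨d1, d2⟩
        simpa using heq
      exact this.symm
    exact cellAt_setCell_ne 0 hs hdin' hy hyne

lemma mem_dead_char (pl : Int) (board : List (List Int)) (d : Int × Int)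
    (hd : d ∈ (PySem.List.pyRange 0 5 1).flatMap (fun i =>
      (PySem.List.pyRange 0 5 1).flatMap (fun j =>
        if cellAt board i j == pl && !(PySem.Set.contains (alt_alive_stones pl board) (i, j)) then [(i, j)] else []))) :
    inR d ∧ cellAt board d.1 d.2 = pl := by
  rw [List.mem_flatMap] at hd
  obtain ⟨i, hi, hd⟩ := hd
  rw [List.mem_flatMap] at hd
  obtain ⟨j, hj, hd⟩ := hd
  rw [PySem.List.mem_pyRange_one] at hi hj
  by_cases h : (cellAt board i j == pl && !(PySem.Set.contains (alt_alive_stones pl board) (i, j))) = true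
  · rw [if_pos h] at hd
    simp only [List.mem_singleton] at hd
    subst hd
    refine ⟨⟨hi.1, hi.2, hj.1, hj.2⟩, ?_⟩
    rw [Bool.and_eq_true] at h
    simpa using h.1
  · rw [if_neg h] at hd
    simp at hd

lemma step_eq (player : Int) (previous_board current_board : List (List Int)) (move : Int × Int)
    (hS : Shape current_board) (hin : inR (move.1, move.2)) (acc : List (Int × Int × (List (Int × Int)))) :
    (let copied_board := current_board
     let copied_board := place_stone move.1 move.2 copied_board player
     let dead_pieces := find_dead_stones (3 - player) copied_board
     let copied_board := clear_dead_stones copied_board dead_pieces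
     if does_liberty_exists move.1 move.2 copied_board player then
       if ko_rule_check previous_board current_board copied_board then
         acc ++ [(move.1, move.2, dead_pieces)]
       else acc
     else acc)
    = (let board := current_board
       let board := setCell board move.1 move.2 player
       let opp_alive := alt_alive_stones (3 - player) board
       let dead_pieces := (PySem.List.pyRange 0 5 1).flatMap (fun i =>
         (PySem.List.pyRange 0 5 1).flatMap (fun j =>
           if cellAt board i j == 3 - player && !(PySem.Set.contains opp_alive (i, j)) then [(i, j)] else []))
       let board := dead_pieces.foldl (fun b piece => setCell b piece.1 piece.2 0) board
       if PySem.Set.contains (alt_alive_stones player board) (move.1, move.2) then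
         if !(board == current_board) && !(board == previous_board) then
           acc ++ [(move.1, move.2, dead_pieces)]
         else acc
       else acc) := by
  show (let dead_pieces := find_dead_stones (3 - player) (place_stone move.1 move.2 current_board player)
        let copied_board := clear_dead_stones (place_stone move.1 move.2 current_board player) dead_pieces
        if does_liberty_exists move.1 move.2 copied_board player then
          if ko_rule_check previous_board current_board copied_board then
            acc ++ [(move.1, move.2, dead_pieces)]
          else acc
        else acc) = _
  have hplace : place_stone move.1 move.2 current_board player
      = setCell current_board move.1 move.2 player := rfl
  have hSP : Shape (setCell current_board move.1 move.2 player) := shape_setCell player hin hS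
  have hdead := dead_eq (3 - player) (setCell current_board move.1 move.2 player)
  simp only [hplace, hdead]
  set D := (PySem.List.pyRange 0 5 1).flatMap (fun i =>
    (PySem.List.pyRange 0 5 1).flatMap (fun j =>
      if cellAt (setCell current_board move.1 move.2 player) i j == 3 - player &&
         !(PySem.Set.contains (alt_alive_stones (3 - player) (setCell current_board move.1 move.2 player)) (i, j))
      then [(i, j)] else [])) with hD
  have hclear : clear_dead_stones (setCell current_board move.1 move.2 player) D
      = D.foldl (fun b piece => setCell b piece.1 piece.2 0) (setCell current_board move.1 move.2 player) := rfl
  obtain ⟨hSC, hCcell⟩ := clear_spec D (setCell current_board move.1 move.2 player) hSP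
      (fun d hd => (mem_dead_char _ _ d (hD ▸ hd)).1)
  have hcellP : cellAt (setCell current_board move.1 move.2 player) move.1 move.2 = player :=
    cellAt_setCell_self player hin hS
  have hmoveC : cellAt (D.foldl (fun b piece => setCell b piece.1 piece.2 0)
      (setCell current_board move.1 move.2 player)) move.1 move.2 = player := by
    have hnd : ∀ d ∈ D, d ≠ (move.1, move.2) := by
      intro d hd heq
      have h2 := (mem_dead_char _ _ d (hD ▸ hd)).2
      rw [heq] at h2
      simp only at h2
      rw [hcellP] at h2
      omega
    have := hCcell (move.1, move.2) hin hnd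
    simp only at this
    rw [this]
    exact hcellP
  have hcond := dle_eq_contains _ player move.1 move.2 hin hmoveC
  have hko : ∀ (u : List (List Int)), ko_rule_check previous_board current_board u
      = (!(u == current_board) && !(u == previous_board)) := by
    intro u
    unfold ko_rule_check
    split_ifs with h
    · exact h.symm
    · rw [Bool.not_eq_true] at h; exact h.symm
  simp only [hclear, hcond, hko]

-- ===== VERDICT (by name: the statement is the Claim_ definition above) =====
theorem get_best_of_valid_moves_spec : Claim_equal_get_best_of_valid_moves := by
  intro player previous_board current_board best_moves hdom hpre
  unfold Spec_get_best_of_valid_moves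
  obtain ⟨hboard, hmoves⟩ := hpre
  rcases hboard with rfl | hShape0
  · simp only [get_best_of_valid_moves, get_best_of_valid_moves_alt, List.foldl_nil]
  · unfold get_best_of_valid_moves get_best_of_valid_moves_alt
    apply PySem.List.foldl_congr_mem
    intro acc move hmove
    obtain ⟨hm1, hm2, hm3, hm4⟩ := hmoves move hmove
    exact step_eq player previous_board current_board move hShape0 ⟨hm1, hm2, hm3, hm4⟩ acc
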